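-- pv_equiv track=rewrite | github.com/RatJuggler/advent-of-code | 2015/day11/advent11.py | contains_sequence
-- ===== SOURCE A (Python) =====
-- def contains_sequence(password: str) -> bool:
--     sequence = 1
--     for i in range(len(password) - 1):
--         if ord(password[i + 1]) != ord(password[i]) + 1:
--             sequence = 1
--         elif sequence == 2:
--             return True
--         else:
--             sequence += 1
--     return False
-- ===== SOURCE B (Python) =====
-- def contains_sequence(password: str) -> bool:
--     for i in range(len(password) - 2):
--         if ord(password[i + 1]) == ord(password[i]) + 1 and ord(password[i + 2]) == ord(password[i + 1]) + 1:
--             return True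
--     return False
-- ===== Notes on version B (the rewrite author's own statement) =====
-- stated objective: simpler
-- what changed: Replaces the stateful adjacent-pair scan with a running counter that resets/increments by a stateless scan over windows of three characters, testing each triple independently.
import Mathlib
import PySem

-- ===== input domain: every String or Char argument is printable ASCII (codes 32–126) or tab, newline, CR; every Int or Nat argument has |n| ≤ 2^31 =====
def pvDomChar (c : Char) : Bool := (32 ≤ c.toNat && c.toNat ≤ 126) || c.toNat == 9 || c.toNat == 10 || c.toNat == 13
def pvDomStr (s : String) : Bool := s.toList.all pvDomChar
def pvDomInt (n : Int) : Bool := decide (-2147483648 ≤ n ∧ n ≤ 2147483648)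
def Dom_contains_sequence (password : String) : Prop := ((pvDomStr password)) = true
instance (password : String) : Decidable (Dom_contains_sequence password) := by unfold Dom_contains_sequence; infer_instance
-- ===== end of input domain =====

-- B replaces A's stateful counter scan by an independent test of each window of three
-- consecutive characters (simpler decomposition; same O(n) cost).
-- ===== PORT A =====
-- A's loop over i in range(len-1) with the running `sequence` counter, as structural
-- recursion over the character list carrying the same counter (early return = true).
def goA : List Char → Int → Bool
  | a :: b :: rest, seq =>
    if b.toNat ≠ a.toNat + 1 then goA (b :: rest) 1
    else if seq = 2 then true
    else goA (b :: rest) (seq + 1)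
  | _, _ => false

def contains_sequence (password : String) : Bool := goA password.toList 1

-- ===== PORT B =====
-- B: stateless scan over windows of three characters.
def goB : List Char → Bool
  | a :: b :: c :: rest =>
    if b.toNat = a.toNat + 1 ∧ c.toNat = b.toNat + 1 then true
    else goB (b :: c :: rest)
  | _ => false

def contains_sequence_alt (password : String) : Bool := goB password.toList

-- ===== PRECONDITION & SPEC =====
def Spec_contains_sequence (password : String) (out : Bool) : Prop := out = contains_sequence_alt password
instance (password : String) (out : Bool) : Decidable (Spec_contains_sequence password out) := by unfold Spec_contains_sequence; infer_instance

-- ===== CLAIM (what is proved, stated in full; the proofs are below) =====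
def Claim_equal_contains_sequence : Prop := ∀ (password : String), Dom_contains_sequence password → Spec_contains_sequence password (contains_sequence password)

-- ===== LEMMAS AND PROOFS =====

-- firstInc a l: the first character of l is the successor of a (the extra fact the
-- counter value 2 encodes about the preceding pair).
def firstInc (a : Char) : List Char → Bool
  | b :: _ => b.toNat = a.toNat + 1
  | [] => false

theorem goA_eq_goB (l : List Char) :
    goA l 1 = goB l ∧ ∀ a : Char, goA (a :: l) 2 = (firstInc a l || goB (a :: l)) := by
  induction l with
  | nil => constructor <;> simp [goA, goB, firstInc]
  | cons b t ih =>
    obtain ⟨ih1, ih2⟩ := ih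
    have h1 : goA (b :: t) 1 = goB (b :: t) := by
      cases t with
      | nil => simp [goA, goB]
      | cons c t' =>
        by_cases h : c.toNat = b.toNat + 1
        · cases t' with
          | nil => simp [goA, goB, h]
          | cons d t'' =>
            by_cases hd : d.toNat = c.toNat + 1
            · simp [goA, goB, h, hd]
            · have hd' : ¬ d.toNat = b.toNat + 1 + 1 := by omega
              have e : goA (b :: c :: d :: t'') 1 = goA (d :: t'') 1 := by
                simp [goA, h, hd']
              rw [e, show goA (d :: t'') 1 = goA (c :: d :: t'') 1 from by
                simp [goA, hd], ih1]
              simp [goB, hd]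
        · simp only [goA, if_pos h, ih1]
          cases t' with
          | nil => simp [goB]
          | cons d t'' => simp [goB, h]
    refine ⟨h1, fun a => ?_⟩
    by_cases h : b.toNat = a.toNat + 1
    · simp [goA, h, firstInc]
    · simp only [goA, if_pos h, h1, firstInc, h]
      cases t with
      | nil => simp [goB]
      | cons c t' => simp [goB, h]

-- ===== VERDICT (by name: the statement is the Claim_ definition above) =====
theorem contains_sequence_spec : Claim_equal_contains_sequence := by
  intro password _
  show contains_sequence password = contains_sequence_alt password
  simp [contains_sequence, contains_sequence_alt, (goA_eq_goB password.toList).1]
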